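-- pv_equiv track=rewrite | github.com/rocketbombs/LM | lambda_infer.py | _path_to_node_id
-- ===== SOURCE A (Python) =====
-- from typing import Dict, List, Optional, Tuple
--
-- def _path_to_node_id(path: List[int]) -> int:
--     # Convert path to node_id for span lookup
--     node_id = 1
--     for direction in path:
--         if direction == 0:
--             node_id = node_id * 2 + 1
--         else:
--             node_id = node_id * 2 + 2
--     return node_id
-- ===== SOURCE B (Python) =====
-- from typing import List
--
-- def _path_to_node_id(path: List[int]) -> int:
--     # Reverse positional-weight summation: walk the path from the leaf end,
--     # adding digit (1 for direction 0, 2 otherwise) times its place value 2^k;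
--     # after the loop the weight equals 2^n, the root's contribution.
--     total = 0
--     weight = 1
--     for direction in reversed(path):
--         total += (1 if direction == 0 else 2) * weight
--         weight *= 2
--     return weight + total
-- ===== Notes on version B (the rewrite author's own statement) =====
-- stated objective: alternative
-- what changed: B walks the path in reverse from the leaf end, summing digit*2^position with an explicitly maintained place-value weight (and the root's 2^n weight at the end), instead of A's forward Horner-style accumulation of node_id.
import Mathlib
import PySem

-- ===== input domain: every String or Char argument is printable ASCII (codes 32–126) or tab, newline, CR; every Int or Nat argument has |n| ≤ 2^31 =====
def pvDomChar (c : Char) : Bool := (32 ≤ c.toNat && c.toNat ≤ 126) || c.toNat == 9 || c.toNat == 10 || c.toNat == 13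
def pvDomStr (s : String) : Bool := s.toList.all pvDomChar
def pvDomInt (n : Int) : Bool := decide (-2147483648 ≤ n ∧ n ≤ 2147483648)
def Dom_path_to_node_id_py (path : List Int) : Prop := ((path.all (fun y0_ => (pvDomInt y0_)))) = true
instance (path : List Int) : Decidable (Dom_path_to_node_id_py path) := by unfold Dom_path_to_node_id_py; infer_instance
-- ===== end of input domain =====

-- B evaluates the path as a digit string from the leaf end with explicit place-value weights,
-- instead of A's forward Horner accumulation; alternative decomposition, same cost.

-- ===== PORT A =====
-- A: forward fold maintaining node_id directly.
def path_to_node_id_py (path : List Int) : Int :=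
  path.foldl (fun node_id direction =>
    if direction == 0 then node_id * 2 + 1 else node_id * 2 + 2) 1

-- ===== PORT B =====
-- B: reverse traversal summing digit * weight, weight doubling each step; return weight + total.
def path_to_node_id_py_alt (path : List Int) : Int :=
  let p := path.reverse.foldl
    (fun (tw : Int × Int) direction =>
      (tw.1 + (if direction == 0 then 1 else 2) * tw.2, tw.2 * 2)) (0, 1)
  p.2 + p.1

-- ===== PRECONDITION & SPEC =====
def Spec_path_to_node_id_py (path : List Int) (out : Int) : Prop := out = path_to_node_id_py_alt path
instance (path : List Int) (out : Int) : Decidable (Spec_path_to_node_id_py path out) := by unfold Spec_path_to_node_id_py; infer_instance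

-- ===== CLAIM (what is proved, stated in full; the proofs are below) =====
def Claim_equal_path_to_node_id_py : Prop := ∀ (path : List Int), Dom_path_to_node_id_py path → Spec_path_to_node_id_py path (path_to_node_id_py path)

-- ===== LEMMAS AND PROOFS =====
-- B's fold: the weight component is the start weight times 2^length, and the total is
-- the start total plus the start weight times the sum computed from (0,1).
theorem pv_foldB_shift (l : List Int) : ∀ (t w : Int),
    l.foldl (fun (tw : Int × Int) direction =>
      (tw.1 + (if direction == 0 then 1 else 2) * tw.2, tw.2 * 2)) (t, w)
    = (t + w * (l.foldl (fun (tw : Int × Int) direction =>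
        (tw.1 + (if direction == 0 then 1 else 2) * tw.2, tw.2 * 2)) (0, 1)).1,
       w * 2 ^ l.length) := by
  induction l with
  | nil => intro t w; simp
  | cons d ds ih =>
    intro t w
    simp only [List.foldl_cons, List.length_cons]
    rw [ih, ih (0 + (if d == 0 then 1 else 2) * 1)]
    by_cases h : d = 0 <;> simp [h, pow_succ] <;> ring_nf <;> simp

-- A's fold from accumulator a equals a * 2^n plus B's reverse-order sum.
theorem pv_foldA_eq (l : List Int) : ∀ (a : Int),
    l.foldl (fun node_id direction =>
      if direction == 0 then node_id * 2 + 1 else node_id * 2 + 2) a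
    = a * 2 ^ l.length + (l.reverse.foldl (fun (tw : Int × Int) direction =>
        (tw.1 + (if direction == 0 then 1 else 2) * tw.2, tw.2 * 2)) (0, 1)).1 := by
  induction l with
  | nil => intro a; simp
  | cons d ds ih =>
    intro a
    simp only [List.foldl_cons, List.length_cons, List.reverse_cons, List.foldl_append]
    rw [ih, pv_foldB_shift ds.reverse 0 1]
    simp only [List.foldl_nil, List.length_reverse]
    by_cases h : d = 0 <;> simp [h, pow_succ] <;> ring

-- ===== VERDICT (by name: the statement is the Claim_ definition above) =====
theorem path_to_node_id_py_spec : Claim_equal_path_to_node_id_py := by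
  intro path _
  unfold Spec_path_to_node_id_py path_to_node_id_py path_to_node_id_py_alt
  rw [pv_foldA_eq path 1]
  rw [pv_foldB_shift path.reverse 0 1]
  simp
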